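-- pv_equiv track=rewrite | github.com/JudyXhen/2017A2CS | Ch25/recursion2.py | groupSum5
-- ===== SOURCE A (Python) =====
-- def groupSum5(start, nums, target):
-- 	if start >= len(nums):
-- 		return target == 0
-- 	if nums[start] % 5 == 0:
-- 		if (start < len(nums) - 1) and nums[start + 1] == 1:
-- 			return groupSum5(start + 2, nums, target - nums[start])
-- 		return groupSum5(start + 1, nums, target - nums[start])
-- 	return groupSum5(start + 1, nums, target - nums[start]) or groupSum5(start + 1, nums, target)
-- ===== SOURCE B (Python) =====
-- def groupSum5(start, nums, target):
--     n = len(nums)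
--     targets = {target}
--     i = start
--     while i < n:
--         v = nums[i]
--         if v % 5 == 0:
--             if i < n - 1 and nums[i + 1] == 1:
--                 i += 2
--             else:
--                 i += 1
--             targets = {t - v for t in targets}
--         else:
--             targets = {t - v for t in targets} | targets
--             i += 1
--     return 0 in targets
-- ===== Notes on version B (the rewrite author's own statement) =====
-- stated objective: alternative
-- what changed: Replaces A's exponential depth-first two-way recursion by a single forward scan over the indices that carries the set of still-achievable remaining targets (breadth-first set DP); duplicate partial sums are merged, so cost is bounded by positions times distinct reachable sums instead of 2^n paths.
import Mathlib
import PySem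

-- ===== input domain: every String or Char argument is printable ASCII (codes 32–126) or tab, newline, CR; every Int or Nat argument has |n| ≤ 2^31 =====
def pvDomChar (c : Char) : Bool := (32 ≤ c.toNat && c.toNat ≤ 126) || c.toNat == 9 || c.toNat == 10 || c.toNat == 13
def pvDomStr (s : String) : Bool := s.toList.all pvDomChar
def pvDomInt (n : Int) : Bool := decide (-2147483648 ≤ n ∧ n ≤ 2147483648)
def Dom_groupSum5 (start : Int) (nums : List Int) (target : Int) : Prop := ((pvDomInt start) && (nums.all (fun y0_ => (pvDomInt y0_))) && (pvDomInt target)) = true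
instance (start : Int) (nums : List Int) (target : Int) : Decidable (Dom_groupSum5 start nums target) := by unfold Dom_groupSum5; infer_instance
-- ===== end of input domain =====

-- B replaces A's exponential two-way recursion by a single forward scan that carries the
-- set of still-achievable remaining targets (breadth-first set DP instead of depth-first
-- backtracking); objective: alternative.

-- ===== PORT A =====
def groupSum5 (start : Int) (nums : List Int) (target : Int) : Bool :=
  if h : start ≥ (nums.length : Int) then target == 0
  else
    match PySem.List.pyGet? nums start with
    | none => false   -- Python raises IndexError here (start < -len(nums)); excluded by Pre_
    | some v =>
      if PySem.Int.mod v 5 == 0 then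
        if start < (nums.length : Int) - 1 && (PySem.List.pyGet? nums (start + 1) == some 1) then
          groupSum5 (start + 2) nums (target - v)
        else
          groupSum5 (start + 1) nums (target - v)
      else
        groupSum5 (start + 1) nums (target - v) || groupSum5 (start + 1) nums target
termination_by ((nums.length : Int) - start).toNat
decreasing_by all_goals omega

-- ===== PORT B =====
-- the while-loop of Source B: i and the set `targets` are the loop state
def groupSum5AltLoop (nums : List Int) (i : Int) (targets : PySem.Set Int) : Bool :=
  if h : i < (nums.length : Int) then
    match PySem.List.pyGet? nums i with
    | none => false   -- Python raises IndexError here (i < -len(nums)); excluded by Pre_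
    | some v =>
      if PySem.Int.mod v 5 == 0 then
        if i < (nums.length : Int) - 1 && (PySem.List.pyGet? nums (i + 1) == some 1) then
          groupSum5AltLoop nums (i + 2) (PySem.Set.ofList (targets.map (fun t => t - v)))
        else
          groupSum5AltLoop nums (i + 1) (PySem.Set.ofList (targets.map (fun t => t - v)))
      else
        groupSum5AltLoop nums (i + 1)
          (PySem.Set.union (PySem.Set.ofList (targets.map (fun t => t - v))) targets)
  else
    PySem.Set.contains targets 0
termination_by ((nums.length : Int) - i).toNat
decreasing_by all_goals omega

def groupSum5_alt (start : Int) (nums : List Int) (target : Int) : Bool :=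
  groupSum5AltLoop nums start (PySem.Set.ofList [target])

-- ===== PRECONDITION & SPEC =====
-- Pre_ excludes exactly the inputs where Python A raises IndexError (start < -len(nums)).
def Pre_groupSum5 (start : Int) (nums : List Int) (target : Int) : Prop :=
  -(nums.length : Int) ≤ start
instance (start : Int) (nums : List Int) (target : Int) : Decidable (Pre_groupSum5 start nums target) := by unfold Pre_groupSum5; infer_instance
def pvWitness_groupSum5 : Int × List Int × Int := (0, [5, 1, 3], 4)

def Spec_groupSum5 (start : Int) (nums : List Int) (target : Int) (out : Bool) : Prop := out = groupSum5_alt start nums target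
instance (start : Int) (nums : List Int) (target : Int) (out : Bool) : Decidable (Spec_groupSum5 start nums target out) := by unfold Spec_groupSum5; infer_instance

-- ===== CLAIM (what is proved, stated in full; the proofs are below) =====
def Claim_equal_groupSum5 : Prop := ∀ (start : Int) (nums : List Int) (target : Int), Dom_groupSum5 start nums target → Pre_groupSum5 start nums target → Spec_groupSum5 start nums target (groupSum5 start nums target)

-- ===== LEMMAS AND PROOFS =====

-- Loop invariant: the set-DP loop succeeds iff some carried remaining target is solvable by A.
lemma loop_invariant (nums : List Int) : ∀ (k : Nat) (i : Int) (S : PySem.Set Int),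
    ((nums.length : Int) - i).toNat = k → -(nums.length : Int) ≤ i →
    (groupSum5AltLoop nums i S = true ↔ ∃ t ∈ S, groupSum5 i nums t = true) := by
  intro k
  induction k using Nat.strong_induction_on with
  | _ k ih =>
  intro i S hk hpre
  by_cases hlt : i < (nums.length : Int)
  · have hne : ¬ (PySem.List.pyGet? nums i = none) := by
      rw [PySem.List.pyGet?_eq_none_iff]
      simp only [PySem.Raise.InRange]
      omega
    obtain ⟨v, hv⟩ := Option.ne_none_iff_exists'.mp hne
    have hA : ∀ t : Int, groupSum5 i nums t =
        (if PySem.Int.mod v 5 == 0 then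
          if i < (nums.length : Int) - 1 && (PySem.List.pyGet? nums (i + 1) == some 1) then
            groupSum5 (i + 2) nums (t - v)
          else groupSum5 (i + 1) nums (t - v)
        else groupSum5 (i + 1) nums (t - v) || groupSum5 (i + 1) nums t) := by
      intro t
      rw [groupSum5]
      rw [dif_neg (by omega : ¬ i ≥ (nums.length : Int)), hv]
    rw [groupSum5AltLoop, dif_pos hlt, hv]
    simp only []
    by_cases h5 : (PySem.Int.mod v 5 == 0) = true
    · by_cases hadj : (i < (nums.length : Int) - 1 && (PySem.List.pyGet? nums (i + 1) == some 1)) = true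
      · rw [if_pos h5, if_pos hadj]
        rw [ih (((nums.length : Int) - (i + 2)).toNat) (by omega) _ _ rfl (by omega)]
        constructor
        · rintro ⟨t', ht', hgs⟩
          rw [PySem.Set.mem_ofList] at ht'
          obtain ⟨t, htS, rfl⟩ := List.mem_map.mp ht'
          refine ⟨t, htS, ?_⟩
          rw [hA t, if_pos h5, if_pos hadj]
          exact hgs
        · rintro ⟨t, htS, hgs⟩
          rw [hA t, if_pos h5, if_pos hadj] at hgs
          exact ⟨t - v, (PySem.Set.mem_ofList _ _).mpr (List.mem_map.mpr ⟨t, htS, rfl⟩), hgs⟩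
      · rw [if_pos h5, if_neg hadj]
        rw [ih (((nums.length : Int) - (i + 1)).toNat) (by omega) _ _ rfl (by omega)]
        constructor
        · rintro ⟨t', ht', hgs⟩
          rw [PySem.Set.mem_ofList] at ht'
          obtain ⟨t, htS, rfl⟩ := List.mem_map.mp ht'
          refine ⟨t, htS, ?_⟩
          rw [hA t, if_pos h5, if_neg hadj]
          exact hgs
        · rintro ⟨t, htS, hgs⟩
          rw [hA t, if_pos h5, if_neg hadj] at hgs
          exact ⟨t - v, (PySem.Set.mem_ofList _ _).mpr (List.mem_map.mpr ⟨t, htS, rfl⟩), hgs⟩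
    · rw [if_neg h5]
      rw [ih (((nums.length : Int) - (i + 1)).toNat) (by omega) _ _ rfl (by omega)]
      constructor
      · rintro ⟨t', ht', hgs⟩
        rw [PySem.Set.mem_union] at ht'
        rcases ht' with h1 | h2
        · rw [PySem.Set.mem_ofList] at h1
          obtain ⟨t, htS, rfl⟩ := List.mem_map.mp h1
          refine ⟨t, htS, ?_⟩
          rw [hA t, if_neg h5]
          exact Bool.or_eq_true_iff.mpr (Or.inl hgs)
        · refine ⟨t', h2, ?_⟩
          rw [hA t', if_neg h5]
          exact Bool.or_eq_true_iff.mpr (Or.inr hgs)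
      · rintro ⟨t, htS, hgs⟩
        rw [hA t, if_neg h5] at hgs
        rcases Bool.or_eq_true_iff.mp hgs with h1 | h2
        · exact ⟨t - v, (PySem.Set.mem_union _ _ _).mpr (Or.inl ((PySem.Set.mem_ofList _ _).mpr (List.mem_map.mpr ⟨t, htS, rfl⟩))), h1⟩
        · exact ⟨t, (PySem.Set.mem_union _ _ _).mpr (Or.inr htS), h2⟩
  · rw [groupSum5AltLoop, dif_neg hlt]
    have hA : ∀ t : Int, groupSum5 i nums t = (t == 0) := by
      intro t
      rw [groupSum5, dif_pos (by omega : i ≥ (nums.length : Int))]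
    simp only [hA, beq_iff_eq, PySem.Set.contains, List.contains_iff_mem]
    exact ⟨fun h => ⟨0, h, rfl⟩, fun ⟨t, ht, e⟩ => e ▸ ht⟩

-- ===== VERDICT (by name: the statement is the Claim_ definition above) =====
theorem groupSum5_spec : Claim_equal_groupSum5 := by
  intro start nums target _ hpre
  unfold Spec_groupSum5 groupSum5_alt
  have h := loop_invariant nums (((nums.length : Int) - start).toNat) start
      (PySem.Set.ofList [target]) rfl hpre
  simp only [PySem.Set.mem_ofList, List.mem_singleton] at h
  have h' : groupSum5AltLoop nums start (PySem.Set.ofList [target]) = true ↔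
      groupSum5 start nums target = true := by
    rw [h]
    constructor
    · rintro ⟨t, rfl, hg⟩; exact hg
    · intro hg; exact ⟨target, rfl, hg⟩
  exact Bool.eq_iff_iff.mpr h'.symm
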